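-- pv_equiv track=rewrite | github.com/k-dovan/nemo_mt | nmt_webapp/utils.py | merge_para_chunks
-- ===== SOURCE A (Python) =====
-- from typing import List
--
-- def count_quotation_marks(text: str, quote_characters: str):
--     count = 0
--     for ch in quote_characters:
--         count += text.count(ch)
--
--     return count
--
-- def is_valid_paragraph(text: str, open_quotes: str, close_quotes: str):
--     count_open = count_quotation_marks(text, quote_characters=open_quotes)
--     count_close = count_quotation_marks(text, quote_characters=close_quotes)
--     result = count_open == count_close
--
--     # print ('open count: ', count_open)
--     # print ('close count: ', count_close)
--     # print ('is valid: ', result)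
--     return result
--
-- def merge_para_chunks(chunks: List[str],
--                       max_length: int = 512,
--                       open_quotes: str =  '“"‘『「',
--                       close_quotes: str = '”"’』」'):
--     paragraphs, new_paragraphs = [], []
--     paragraph = ""
--     acc_length = 0
--     for p in chunks:
--         if acc_length > 0:
--             if acc_length + len(p) < max_length:
--                 paragraph += p
--                 acc_length += len(p)
--             elif acc_length + len(p) == max_length:
--                 if is_valid_paragraph(paragraph+p, open_quotes, close_quotes):
--                     paragraphs.append(paragraph+p)
--                     new_paragraphs.append(False)
--                     # print ('+01')
--                     paragraph = ""
--                     acc_length = 0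
--                 else:
--                     paragraph += p
--                     acc_length += len(p)
--             elif acc_length + len(p) > max_length:
--                 if is_valid_paragraph(paragraph, open_quotes, close_quotes):
--                     paragraphs.append(paragraph)
--                     new_paragraphs.append(False)
--                     # print ('+01')
--                     paragraph = ""
--                     acc_length = 0
--                     if len(p) >= max_length:
--                         if is_valid_paragraph(p, open_quotes, close_quotes):
--                             paragraphs.append(p)
--                             new_paragraphs.append(False)
--                             # print ('+01')
--                         else:
--                             paragraph = p
--                             acc_length = len(p)
--                     else:
--                         paragraph = p
--                         acc_length = len(p)
--                 else:
--                     paragraph += p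
--                     acc_length += len(p)
--         else:
--             if len(p) >= max_length:
--                 if is_valid_paragraph(p, open_quotes, close_quotes):
--                     paragraphs.append(p)
--                     new_paragraphs.append(False)
--                     # print ('+01')
--                 else:
--                     paragraph = p
--                     acc_length = len(p)
--             else:
--                 paragraph = p
--                 acc_length = len(p)
--     if acc_length > 0:
--         # just to make sure the last paragraph valid
--         is_valid_paragraph(paragraph, open_quotes, close_quotes)
--
--         paragraphs.append(paragraph)
--         new_paragraphs.append(True)
--         # print ('+01')
--     # set new paragraph flag to the last element
--     new_paragraphs[-1] = True
--
--     return paragraphs, new_paragraphs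
-- ===== SOURCE B (Python) =====
-- def merge_para_chunks(chunks,
--                       max_length=512,
--                       open_quotes='“"‘『「',
--                       close_quotes='”"’』」'):
--     # weight of each character in the quote alphabets (handles duplicates)
--     wo = {}
--     for q in open_quotes:
--         wo[q] = wo.get(q, 0) + 1
--     wc = {}
--     for q in close_quotes:
--         wc[q] = wc.get(q, 0) + 1
--
--     paragraphs = []
--     parts = []            # pieces of the pending paragraph
--     acc = 0               # its total length
--     bo = bc = 0           # its running open/close quote counts
--     for p in chunks:
--         po = sum(wo.get(ch, 0) for ch in p)
--         pc = sum(wc.get(ch, 0) for ch in p)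
--         n = len(p)
--         if acc == 0:
--             if n >= max_length and po == pc:
--                 paragraphs.append(p)
--             else:
--                 parts, acc, bo, bc = [p], n, po, pc
--         elif acc + n < max_length:
--             parts.append(p); acc += n; bo += po; bc += pc
--         elif acc + n == max_length:
--             if bo + po == bc + pc:
--                 parts.append(p)
--                 paragraphs.append("".join(parts))
--                 parts, acc, bo, bc = [], 0, 0, 0
--             else:
--                 parts.append(p); acc += n; bo += po; bc += pc
--         elif bo == bc:
--             paragraphs.append("".join(parts))
--             if n >= max_length and po == pc:
--                 paragraphs.append(p)
--                 parts, acc, bo, bc = [], 0, 0, 0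
--             else:
--                 parts, acc, bo, bc = [p], n, po, pc
--         else:
--             parts.append(p); acc += n; bo += po; bc += pc
--     if acc > 0:
--         paragraphs.append("".join(parts))
--     flags = [False] * len(paragraphs)
--     if flags:
--         flags[-1] = True
--     return paragraphs, flags
-- ===== Notes on version B (the rewrite author's own statement) =====
-- stated objective: faster
-- what changed: B keeps incremental running open/close-quote counts and length for the pending paragraph (quote weights from a dict built once per alphabet) and collects its pieces in a list joined only when flushed, instead of rescanning the whole accumulated paragraph for every validity check and rebuilding the flag list element-wise; flags are emitted as [False]*k with the last set True.
-- crash fix: On empty chunk lists, and on nonempty ones whose chunks are all empty strings while max_length > 0, A produces no paragraph and its final new_paragraphs[-1] = True raises IndexError; B returns ([], []). — e.g. on merge_para_chunks(["", ""], 512, "\"", "\""): A raises IndexError, B returns ([], [])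
import Mathlib
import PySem

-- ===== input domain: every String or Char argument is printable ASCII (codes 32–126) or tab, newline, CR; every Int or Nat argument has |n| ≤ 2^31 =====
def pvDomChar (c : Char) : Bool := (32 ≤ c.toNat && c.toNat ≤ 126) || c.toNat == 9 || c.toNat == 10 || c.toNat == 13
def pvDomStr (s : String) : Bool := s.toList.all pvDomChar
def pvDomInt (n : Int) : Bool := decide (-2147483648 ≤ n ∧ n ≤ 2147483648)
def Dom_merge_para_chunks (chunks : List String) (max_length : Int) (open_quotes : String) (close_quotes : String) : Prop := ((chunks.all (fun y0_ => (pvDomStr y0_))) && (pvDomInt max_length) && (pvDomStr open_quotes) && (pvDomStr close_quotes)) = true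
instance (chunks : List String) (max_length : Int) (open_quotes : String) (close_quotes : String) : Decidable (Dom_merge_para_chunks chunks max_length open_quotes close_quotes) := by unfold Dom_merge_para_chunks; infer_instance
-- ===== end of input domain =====

-- B replaces A's full rescans of the accumulated paragraph at every validity check by
-- incremental running open/close-quote counts (weights from a dict built once per quote
-- alphabet) and joins the paragraph's pieces only when flushed; objective: faster.

-- ===== PORT A =====
-- count_quotation_marks(text, quote_characters)
def pvCountQuotes (text : List Char) (quote_characters : List Char) : Int :=
  quote_characters.foldl (fun count ch => count + (PySem.Chars.count text [ch] : Int)) 0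

-- is_valid_paragraph(text, open_quotes, close_quotes)
def pvIsValid (text : List Char) (oqs cqs : List Char) : Bool :=
  pvCountQuotes text oqs == pvCountQuotes text cqs

-- body of A's 'for p in chunks' loop; state = (paragraphs, new_paragraphs, paragraph, acc_length)
def pvStepA (max_length : Int) (oqs cqs : List Char) :
    List (List Char) × List Bool × List Char × Int → List Char →
    List (List Char) × List Bool × List Char × Int
  | (paras, flags, para, acc), p =>
    if acc > 0 then
      if acc + (p.length : Int) < max_length then
        (paras, flags, para ++ p, acc + (p.length : Int))
      else if acc + (p.length : Int) == max_length then
        if pvIsValid (para ++ p) oqs cqs then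
          (paras ++ [para ++ p], flags ++ [false], [], 0)
        else (paras, flags, para ++ p, acc + (p.length : Int))
      else
        if pvIsValid para oqs cqs then
          if (p.length : Int) ≥ max_length then
            if pvIsValid p oqs cqs then
              (paras ++ [para] ++ [p], flags ++ [false] ++ [false], [], 0)
            else (paras ++ [para], flags ++ [false], p, (p.length : Int))
          else (paras ++ [para], flags ++ [false], p, (p.length : Int))
        else (paras, flags, para ++ p, acc + (p.length : Int))
    else
      if (p.length : Int) ≥ max_length then
        if pvIsValid p oqs cqs then (paras ++ [p], flags ++ [false], [], 0)
        else (paras, flags, p, (p.length : Int))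
      else (paras, flags, p, (p.length : Int))

def merge_para_chunks (chunks : List String) (max_length : Int) (open_quotes : String) (close_quotes : String) : List String × List Bool :=
  let oqs := open_quotes.toList
  let cqs := close_quotes.toList
  let s := (chunks.map String.toList).foldl (pvStepA max_length oqs cqs) ([], [], [], 0)
  let paras := s.1
  let flags := s.2.1
  let para := s.2.2.1
  let acc := s.2.2.2
  let paras := if acc > 0 then paras ++ [para] else paras
  let flags := if acc > 0 then flags ++ [true] else flags
  -- new_paragraphs[-1] = True  (IndexError on an empty list: those inputs are outside Pre_;
  -- the 'if flags = []' guard only totalises the assignment)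
  let flags := if flags = [] then [] else flags.dropLast ++ [true]
  (paras.map (fun l => String.ofList l), flags)

-- ===== PORT B =====
-- the weight dict: for q in quotes: w[q] = w.get(q, 0) + 1
def pvWeights (qs : List Char) : PySem.Dict Char Int :=
  qs.foldl (fun d q => d.insert q (d.getD q 0 + 1)) PySem.Dict.empty

-- sum(w.get(ch, 0) for ch in p)
def pvWeightedCount (w : PySem.Dict Char Int) (p : List Char) : Int :=
  p.foldl (fun a ch => a + w.getD ch 0) 0

-- body of B's loop; state = (paragraphs, parts, acc, bo, bc)
def pvStepB (max_length : Int) (wo wc : PySem.Dict Char Int) :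
    List (List Char) × List (List Char) × Int × Int × Int → List Char →
    List (List Char) × List (List Char) × Int × Int × Int
  | (paras, parts, acc, bo, bc), p =>
    let po := pvWeightedCount wo p
    let pc := pvWeightedCount wc p
    let n : Int := (p.length : Int)
    if acc == 0 then
      if n ≥ max_length && po == pc then (paras ++ [p], parts, acc, bo, bc)
      else (paras, [p], n, po, pc)
    else if acc + n < max_length then (paras, parts ++ [p], acc + n, bo + po, bc + pc)
    else if acc + n == max_length then
      if bo + po == bc + pc then
        (paras ++ [PySem.Chars.join [] (parts ++ [p])], [], 0, 0, 0)
      else (paras, parts ++ [p], acc + n, bo + po, bc + pc)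
    else if bo == bc then
      if n ≥ max_length && po == pc then
        (paras ++ [PySem.Chars.join [] parts] ++ [p], [], 0, 0, 0)
      else (paras ++ [PySem.Chars.join [] parts], [p], n, po, pc)
    else (paras, parts ++ [p], acc + n, bo + po, bc + pc)

def merge_para_chunks_alt (chunks : List String) (max_length : Int) (open_quotes : String) (close_quotes : String) : List String × List Bool :=
  let wo := pvWeights open_quotes.toList
  let wc := pvWeights close_quotes.toList
  let s := (chunks.map String.toList).foldl (pvStepB max_length wo wc) ([], [], 0, 0, 0)
  let paras := s.1
  let parts := s.2.1
  let acc := s.2.2.1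
  let paras := if acc > 0 then paras ++ [PySem.Chars.join [] parts] else paras
  let flags := List.replicate paras.length false
  let flags := if flags = [] then flags else flags.dropLast ++ [true]
  (paras.map (fun l => String.ofList l), flags)

-- ===== PRECONDITION & SPEC =====
-- Pre_ excludes exactly the inputs on which Python A raises IndexError at
-- 'new_paragraphs[-1] = True': an empty chunk list, or (with max_length > 0) a chunk
-- list all of whose chunks are empty strings, so no paragraph is ever produced.
def Pre_merge_para_chunks (chunks : List String) (max_length : Int) (open_quotes : String) (close_quotes : String) : Prop :=
  chunks ≠ [] ∧ (max_length ≤ 0 ∨ ∃ s ∈ chunks, s ≠ "")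
instance (chunks : List String) (max_length : Int) (open_quotes : String) (close_quotes : String) : Decidable (Pre_merge_para_chunks chunks max_length open_quotes close_quotes) := by unfold Pre_merge_para_chunks; infer_instance

def pvWitness_merge_para_chunks : List String × Int × String × String :=
  (["he said \"hi\"", "and left"], 12, "\"", "\"")

-- On empty chunk lists, and on nonempty ones whose chunks are all empty strings while
-- max_length > 0, A produces no paragraph and 'new_paragraphs[-1] = True' raises
-- IndexError; B returns ([], []).
def Raises_merge_para_chunks (chunks : List String) (max_length : Int) (open_quotes : String) (close_quotes : String) : Prop :=
  chunks = [] ∨ (0 < max_length ∧ ∀ s ∈ chunks, s = "")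
instance (chunks : List String) (max_length : Int) (open_quotes : String) (close_quotes : String) : Decidable (Raises_merge_para_chunks chunks max_length open_quotes close_quotes) := by unfold Raises_merge_para_chunks; infer_instance

def pvRaiseWitness_merge_para_chunks : List String × Int × String × String :=
  (["", ""], 512, "\"", "\"")
def pvRaiseWitnessOut_merge_para_chunks : List String × List Bool := ([], [])

def Spec_merge_para_chunks (chunks : List String) (max_length : Int) (open_quotes : String) (close_quotes : String) (out : List String × List Bool) : Prop := out = merge_para_chunks_alt chunks max_length open_quotes close_quotes
instance (chunks : List String) (max_length : Int) (open_quotes : String) (close_quotes : String) (out : List String × List Bool) : Decidable (Spec_merge_para_chunks chunks max_length open_quotes close_quotes out) := by unfold Spec_merge_para_chunks; infer_instance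

-- ===== CLAIM (what is proved, stated in full; the proofs are below) =====
def Claim_equal_merge_para_chunks : Prop := ∀ (chunks : List String) (max_length : Int) (open_quotes : String) (close_quotes : String), Dom_merge_para_chunks chunks max_length open_quotes close_quotes → Pre_merge_para_chunks chunks max_length open_quotes close_quotes → Spec_merge_para_chunks chunks max_length open_quotes close_quotes (merge_para_chunks chunks max_length open_quotes close_quotes)

def Claim_raises_merge_para_chunks : Prop := (∀ (chunks : List String) (max_length : Int) (open_quotes : String) (close_quotes : String), Dom_merge_para_chunks chunks max_length open_quotes close_quotes → Raises_merge_para_chunks chunks max_length open_quotes close_quotes → ¬ Pre_merge_para_chunks chunks max_length open_quotes close_quotes) ∧ (Dom_merge_para_chunks (pvRaiseWitness_merge_para_chunks.1) (pvRaiseWitness_merge_para_chunks.2.1) (pvRaiseWitness_merge_para_chunks.2.2.1) (pvRaiseWitness_merge_para_chunks.2.2.2) ∧ Raises_merge_para_chunks (pvRaiseWitness_merge_para_chunks.1) (pvRaiseWitness_merge_para_chunks.2.1) (pvRaiseWitness_merge_para_chunks.2.2.1) (pvRaiseWitness_merge_para_chunks.2.2.2) ∧ merge_para_chunks_alt (pvRaiseWitness_merge_para_chunks.1)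 (pvRaiseWitness_merge_para_chunks.2.1) (pvRaiseWitness_merge_para_chunks.2.2.1) (pvRaiseWitness_merge_para_chunks.2.2.2) = pvRaiseWitnessOut_merge_para_chunks)

-- ===== LEMMAS AND PROOFS =====

-- PySem.Chars.count of a single character is List.count
theorem pvCount_go_singleton (c : Char) (l : List Char) (fuel : Nat) (acc : Nat)
    (h : l.length ≤ fuel) : PySem.Chars.count.go [c] fuel l acc = acc + l.count c := by
  induction l generalizing fuel acc with
  | nil => cases fuel <;> simp [PySem.Chars.count.go]
  | cons x t ih =>
      cases fuel with
      | zero => simp at h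
      | succ f =>
          simp only [PySem.Chars.count.go, List.isPrefixOf, Bool.and_true,
            List.length_singleton, List.drop_succ_cons, List.drop_zero]
          by_cases hx : c = x
          · subst hx
            rw [if_pos (by simp), ih _ _ (by simpa using h), List.count_cons_self]
            omega
          · rw [if_neg (by simpa using hx), ih _ _ (by simpa using h)]
            rw [List.count_cons_of_ne (Ne.symm hx)]

theorem pvCount_singleton (s : List Char) (c : Char) :
    PySem.Chars.count s [c] = s.count c := by
  simp [PySem.Chars.count, pvCount_go_singleton c s s.length 0 le_rfl]

theorem pvJoin_nil_flatten (l : List (List Char)) : PySem.Chars.join [] l = l.flatten := by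
  induction l with
  | nil => rfl
  | cons x t ih => cases t <;> simp_all [PySem.Chars.join, List.intercalate]

-- the character-weighted sum B computes per chunk
def pvCnt (qs p : List Char) : Int :=
  p.foldl (fun a ch => a + (qs.count ch : Int)) 0

theorem pvWeightedCount_eq (qs p : List Char) :
    pvWeightedCount (pvWeights qs) p = pvCnt qs p := by
  have hw : pvWeights qs = PySem.Dict.counter qs :=
    PySem.Dict.foldl_insert_getD_add_one_eq_counter qs
  unfold pvWeightedCount pvCnt
  rw [hw]
  exact PySem.List.foldl_congr_mem p _ _ 0
    (fun acc x _ => by rw [PySem.Dict.getD_counter])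

-- double counting: A's per-quote scan equals B's per-character weighted sum
theorem pvCountQuotes_eq (p qs : List Char) : pvCountQuotes p qs = pvCnt qs p := by
  unfold pvCountQuotes pvCnt
  rw [PySem.List.foldl_congr_mem qs _
    (fun count ch => count + (p.count ch : Int)) 0
    (fun acc x _ => by rw [pvCount_singleton]),
    PySem.List.foldl_add, PySem.List.foldl_add]
  simp only [Int.zero_add]
  induction qs with
  | nil => simp
  | cons q rest ih =>
      simp only [List.map_cons, List.sum_cons]
      have heq : (List.map (fun ch => ((List.count ch (q :: rest) : Nat) : Int)) p)
          = List.map (fun ch => (if ch == q then (1:Int) else 0) + (List.count ch rest : Int)) p := by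
        apply List.map_congr_left
        intro ch _
        rw [List.count_cons]
        by_cases h : ch = q
        · simp [h]; ring
        · simp [h]
          exact fun hh => h hh.symm
      rw [heq, PySem.List.sum_map_add_int, ← ih,
        PySem.List.sum_map_ite_one_zero (fun ch => ch == q) p]
      have hc : p.countP (fun ch => ch == q) = p.count q := rfl
      rw [hc]

theorem pvCnt_append (qs a b : List Char) :
    pvCnt qs (a ++ b) = pvCnt qs a + pvCnt qs b := by
  unfold pvCnt
  rw [PySem.List.foldl_add, PySem.List.foldl_add, PySem.List.foldl_add]
  simp [List.map_append]

-- validity of a paragraph in terms of its running counts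
theorem pvIsValid_eq (oqs cqs p : List Char) :
    pvIsValid p oqs cqs = (pvCnt oqs p == pvCnt cqs p) := by
  unfold pvIsValid
  rw [pvCountQuotes_eq, pvCountQuotes_eq]

-- the invariant tying A's loop state to B's
def pvRel (oqs cqs : List Char)
    (sa : List (List Char) × List Bool × List Char × Int)
    (sb : List (List Char) × List (List Char) × Int × Int × Int) : Prop :=
  sb.1 = sa.1 ∧
  sa.2.1 = List.replicate sa.1.length false ∧
  PySem.Chars.join [] sb.2.1 = sa.2.2.1 ∧
  sb.2.2.1 = sa.2.2.2 ∧
  sa.2.2.2 = (sa.2.2.1.length : Int) ∧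
  sb.2.2.2.1 = pvCnt oqs sa.2.2.1 ∧
  sb.2.2.2.2 = pvCnt cqs sa.2.2.1

theorem pvCnt_nil (qs : List Char) : pvCnt qs [] = 0 := rfl

theorem pvStep_rel (max_length : Int) (oqs cqs : List Char)
    (sa : List (List Char) × List Bool × List Char × Int)
    (sb : List (List Char) × List (List Char) × Int × Int × Int)
    (h : pvRel oqs cqs sa sb) (p : List Char) :
    pvRel oqs cqs (pvStepA max_length oqs cqs sa p)
      (pvStepB max_length (pvWeights oqs) (pvWeights cqs) sb p) := by
  obtain ⟨paras, flags, para, acc⟩ := sa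
  obtain ⟨paras', parts, acc', bo, bc⟩ := sb
  obtain ⟨h1, h2, h3, h4, h5, h6, h7⟩ := h
  simp only at h1 h2 h3 h4 h5 h6 h7
  subst h1 h2 h4 h5 h6 h7
  rw [pvJoin_nil_flatten] at h3
  simp only [pvStepA, pvStepB, pvWeightedCount_eq, pvIsValid_eq]
  by_cases h0 : (para.length : Int) = 0
  · have hpe : para = [] := by
      have hl : para.length = 0 := by exact_mod_cast h0
      exact List.eq_nil_of_length_eq_zero hl
    subst hpe
    by_cases hlen : (p.length : Int) ≥ max_length
    · by_cases hv : pvCnt oqs p = pvCnt cqs p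
      · simp [pvRel, pvJoin_nil_flatten, h3, List.replicate_succ', hlen, hv]
      · simp [pvRel, hlen, hv]
    · simp [pvRel, hlen]
  · have hpos : 0 < para.length := by omega
    have hne : para ≠ [] := by
      intro hh
      rw [hh] at hpos
      simp at hpos
    by_cases hlt : (para.length : Int) + (p.length : Int) < max_length
    · simp [pvRel, pvJoin_nil_flatten, pvCnt_append, hpos, hne, hlt, h3]
    · by_cases heq : (para.length : Int) + (p.length : Int) = max_length
      · by_cases hv : pvCnt oqs para + pvCnt oqs p = pvCnt cqs para + pvCnt cqs p
        · simp [pvRel, pvJoin_nil_flatten, pvCnt_append, pvCnt_nil,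
            List.replicate_succ', hpos, hne, heq, hv, h3]
        · simp [pvRel, pvJoin_nil_flatten, pvCnt_append, hpos, hne, heq, hv, h3]
      · by_cases hv : pvCnt oqs para = pvCnt cqs para
        · by_cases hlen : (p.length : Int) ≥ max_length
          · by_cases hvp : pvCnt oqs p = pvCnt cqs p
            · simp [pvRel, pvJoin_nil_flatten, pvCnt_nil,
                List.replicate_succ', hpos, hne, hlt, heq, hv, hlen, hvp, h3]
            · simp [pvRel, pvJoin_nil_flatten, List.replicate_succ',
                hpos, hne, hlt, heq, hv, hlen, hvp, h3]
          · simp [pvRel, pvJoin_nil_flatten, List.replicate_succ',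
              hpos, hne, hlt, heq, hv, hlen, h3]
        · simp [pvRel, pvJoin_nil_flatten, pvCnt_append, hpos, hne, hlt, heq, hv, h3]

theorem pvFold_rel (max_length : Int) (oqs cqs : List Char) (l : List (List Char))
    (sa : List (List Char) × List Bool × List Char × Int)
    (sb : List (List Char) × List (List Char) × Int × Int × Int)
    (h : pvRel oqs cqs sa sb) :
    pvRel oqs cqs (l.foldl (pvStepA max_length oqs cqs) sa)
      (l.foldl (pvStepB max_length (pvWeights oqs) (pvWeights cqs)) sb) := by
  induction l generalizing sa sb with
  | nil => exact h
  | cons x t ih =>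
      exact ih _ _ (pvStep_rel max_length oqs cqs sa sb h x)

theorem pvFinal (oqs cqs : List Char)
    (sa : List (List Char) × List Bool × List Char × Int)
    (sb : List (List Char) × List (List Char) × Int × Int × Int)
    (h : pvRel oqs cqs sa sb) :
    ((if sa.2.2.2 > 0 then sa.1 ++ [sa.2.2.1] else sa.1).map (fun l => String.ofList l),
      if (if sa.2.2.2 > 0 then sa.2.1 ++ [true] else sa.2.1) = [] then []
      else (if sa.2.2.2 > 0 then sa.2.1 ++ [true] else sa.2.1).dropLast ++ [true])
    = ((if sb.2.2.1 > 0 then sb.1 ++ [PySem.Chars.join [] sb.2.1] else sb.1).map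
        (fun l => String.ofList l),
      if List.replicate
          (if sb.2.2.1 > 0 then sb.1 ++ [PySem.Chars.join [] sb.2.1] else sb.1).length
          false = [] then
        List.replicate
          (if sb.2.2.1 > 0 then sb.1 ++ [PySem.Chars.join [] sb.2.1] else sb.1).length false
      else (List.replicate
          (if sb.2.2.1 > 0 then sb.1 ++ [PySem.Chars.join [] sb.2.1] else sb.1).length
          false).dropLast ++ [true]) := by
  obtain ⟨paras, flags, para, acc⟩ := sa
  obtain ⟨paras', parts, acc', bo, bc⟩ := sb
  obtain ⟨h1, h2, h3, h4, h5, h6, h7⟩ := h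
  simp only at h1 h2 h3 h4 h5 h6 h7
  subst h1 h2 h4 h5
  rw [pvJoin_nil_flatten] at h3
  by_cases hacc : ((para.length : Int)) > 0
  · simp only [if_pos hacc]
    simp [pvJoin_nil_flatten, h3, List.replicate_succ']
  · simp only [if_neg hacc]
    cases paras' with
    | nil => simp
    | cons a t => simp [List.replicate_succ']

theorem pvPorts_agree (chunks : List String) (max_length : Int)
    (open_quotes close_quotes : String) :
    merge_para_chunks chunks max_length open_quotes close_quotes
      = merge_para_chunks_alt chunks max_length open_quotes close_quotes := by
  unfold merge_para_chunks merge_para_chunks_alt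
  exact pvFinal open_quotes.toList close_quotes.toList _ _
    (pvFold_rel max_length open_quotes.toList close_quotes.toList
      (chunks.map String.toList) ([], [], [], 0) ([], [], 0, 0, 0)
      ⟨rfl, rfl, rfl, rfl, rfl, rfl, rfl⟩)

-- ===== VERDICT (by name: the statement is the Claim_ definition above) =====
theorem merge_para_chunks_spec : Claim_equal_merge_para_chunks := by
  intro chunks max_length open_quotes close_quotes _ _
  unfold Spec_merge_para_chunks
  exact pvPorts_agree chunks max_length open_quotes close_quotes

theorem merge_para_chunks_raises : Claim_raises_merge_para_chunks := by
  unfold Claim_raises_merge_para_chunks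
  constructor
  · intro chunks max_length open_quotes close_quotes _ hr hp
    obtain ⟨hne, hor⟩ := hp
    rcases hr with h | ⟨hml, hall⟩
    · exact hne h
    · rcases hor with h | ⟨s, hs, hne'⟩
      · omega
      · exact hne' (hall s hs)
  · exact ⟨by decide, by decide, by decide⟩

-- self-check tying both delivered claims together (keeps each verdict referenced)
theorem pvVerdicts_ok : Claim_equal_merge_para_chunks ∧ Claim_raises_merge_para_chunks :=
  ⟨merge_para_chunks_spec, merge_para_chunks_raises⟩
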